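-- pv_equiv track=rewrite | github.com/EECS-573-KNN-Accelerator/eecs573project | knn_accelerator/golden_model/top_simulator.py | build_stream
-- ===== SOURCE A (Python) =====
-- BIT_WIDTH = 17
--
-- def int_to_bits(val):
--     """ Convert integer to list of bits (0 or 1), MSB first. """
--     val = val & ((1 << BIT_WIDTH) - 1)
--     return [(val >> i) & 1 for i in reversed(range(BIT_WIDTH))]
--
-- def build_stream(q_point, r_point):
--     """ Interleaves bits Q and R points MSB -> LSB """
--     qx = int_to_bits(q_point[0])
--     qy = int_to_bits(q_point[1])
--     qz = int_to_bits(q_point[2])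
--     rx = int_to_bits(r_point[0])
--     ry = int_to_bits(r_point[1])
--     rz = int_to_bits(r_point[2])
--
--     stream = []
--     for i in range(BIT_WIDTH):
--         bit_pos_idx = i + 1
--         stream.append((qx[i], rx[i], 0b01, bit_pos_idx)) # X
--         stream.append((qy[i], ry[i], 0b10, bit_pos_idx)) # Y
--         stream.append((qz[i], rz[i], 0b11, bit_pos_idx)) # Z
--     return stream
-- ===== SOURCE B (Python) =====
-- BIT_WIDTH = 17
--
-- def build_stream(q_point, r_point):
--     """Interleaves bits of Q and R points MSB -> LSB, by recursively peeling
--     LSB bits with divmod and building the stream back-to-front."""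
--     mask = (1 << BIT_WIDTH) - 1
--
--     def peel(qx, qy, qz, rx, ry, rz, pos):
--         if pos == 0:
--             return []
--         return peel(qx // 2, qy // 2, qz // 2, rx // 2, ry // 2, rz // 2, pos - 1) + [
--             (qx % 2, rx % 2, 0b01, pos),
--             (qy % 2, ry % 2, 0b10, pos),
--             (qz % 2, rz % 2, 0b11, pos),
--         ]
--
--     return peel(q_point[0] & mask, q_point[1] & mask, q_point[2] & mask,
--                 r_point[0] & mask, r_point[1] & mask, r_point[2] & mask, BIT_WIDTH)
-- ===== Notes on version B (the rewrite author's own statement) =====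
-- stated objective: alternative
-- what changed: B drops int_to_bits and its six precomputed MSB-first bit lists: a recursion peels the LSB of each masked coordinate with divmod, recurses on the halved values, and builds the interleaved stream back-to-front by appending each bit group after the recursive call.
import Mathlib
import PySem

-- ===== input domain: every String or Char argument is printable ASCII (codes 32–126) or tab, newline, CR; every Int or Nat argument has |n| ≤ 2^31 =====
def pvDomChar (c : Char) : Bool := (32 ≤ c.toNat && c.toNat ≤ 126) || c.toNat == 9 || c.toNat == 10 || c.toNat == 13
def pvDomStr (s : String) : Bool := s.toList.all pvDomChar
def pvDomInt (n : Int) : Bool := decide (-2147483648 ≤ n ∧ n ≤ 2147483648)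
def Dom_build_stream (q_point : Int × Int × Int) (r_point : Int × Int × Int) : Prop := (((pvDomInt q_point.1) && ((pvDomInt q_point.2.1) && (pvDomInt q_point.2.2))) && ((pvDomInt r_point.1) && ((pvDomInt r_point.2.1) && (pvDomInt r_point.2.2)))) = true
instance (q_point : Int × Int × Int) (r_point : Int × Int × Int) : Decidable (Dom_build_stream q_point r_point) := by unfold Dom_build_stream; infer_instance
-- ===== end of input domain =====

-- B replaces A's six precomputed MSB-first bit lists and index loop by a recursion that
-- peels LSB bits off the six masked coordinates with divmod, building the stream
-- back-to-front (objective: alternative decomposition, same cost).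

-- ===== PORT A =====
def BIT_WIDTH : Nat := 17

-- Python 'val >> i' on the masked (hence nonnegative) value is floor division by 2^i.
def int_to_bits (val : Int) : List Int :=
  let v := PySem.Int.band val ((2 ^ BIT_WIDTH : Int) - 1)
  ((List.range BIT_WIDTH).reverse).map (fun i => PySem.Int.band (PySem.Int.floordiv v (2 ^ i)) 1)

def build_stream (q_point : Int × Int × Int) (r_point : Int × Int × Int) : List (Int × Int × Int × Int) :=
  let qx := int_to_bits q_point.1
  let qy := int_to_bits q_point.2.1
  let qz := int_to_bits q_point.2.2
  let rx := int_to_bits r_point.1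
  let ry := int_to_bits r_point.2.1
  let rz := int_to_bits r_point.2.2
  (List.range BIT_WIDTH).foldl (fun stream i =>
    stream
      ++ [(qx.getD i 0, rx.getD i 0, (1 : Int), ((i : Int) + 1))]
      ++ [(qy.getD i 0, ry.getD i 0, (2 : Int), ((i : Int) + 1))]
      ++ [(qz.getD i 0, rz.getD i 0, (3 : Int), ((i : Int) + 1))]) []

-- ===== PORT B =====
-- Port of Source B's inner recursive 'peel': peels the LSB of each coordinate with % and //,
-- recurses on the halved values, and appends the current bit group after the recursive call.
def peel (qx qy qz rx ry rz : Int) : Nat → List (Int × Int × Int × Int)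
  | 0 => []
  | n + 1 =>
      peel (PySem.Int.floordiv qx 2) (PySem.Int.floordiv qy 2) (PySem.Int.floordiv qz 2)
           (PySem.Int.floordiv rx 2) (PySem.Int.floordiv ry 2) (PySem.Int.floordiv rz 2) n
      ++ [(PySem.Int.mod qx 2, PySem.Int.mod rx 2, (1 : Int), ((n : Int) + 1)),
          (PySem.Int.mod qy 2, PySem.Int.mod ry 2, (2 : Int), ((n : Int) + 1)),
          (PySem.Int.mod qz 2, PySem.Int.mod rz 2, (3 : Int), ((n : Int) + 1))]

def build_stream_alt (q_point : Int × Int × Int) (r_point : Int × Int × Int) : List (Int × Int × Int × Int) :=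
  let mask : Int := (2 ^ BIT_WIDTH : Int) - 1
  peel (PySem.Int.band q_point.1 mask) (PySem.Int.band q_point.2.1 mask) (PySem.Int.band q_point.2.2 mask)
       (PySem.Int.band r_point.1 mask) (PySem.Int.band r_point.2.1 mask) (PySem.Int.band r_point.2.2 mask)
       BIT_WIDTH

-- ===== PRECONDITION & SPEC =====
def Spec_build_stream (q_point : Int × Int × Int) (r_point : Int × Int × Int) (out : List (Int × Int × Int × Int)) : Prop := out = build_stream_alt q_point r_point
instance (q_point : Int × Int × Int) (r_point : Int × Int × Int) (out : List (Int × Int × Int × Int)) : Decidable (Spec_build_stream q_point r_point out) := by unfold Spec_build_stream; infer_instance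

-- ===== CLAIM (what is proved, stated in full; the proofs are below) =====
def Claim_equal_build_stream : Prop := ∀ (q_point : Int × Int × Int) (r_point : Int × Int × Int), Dom_build_stream q_point r_point → Spec_build_stream q_point r_point (build_stream q_point r_point)

-- ===== LEMMAS AND PROOFS =====

-- bit k of v, as both programs ultimately compute it
def bitf (v : Int) (k : Nat) : Int := PySem.Int.mod (PySem.Int.floordiv v (2 ^ k)) 2

-- canonical form both ports are reduced to
def canon (n : Nat) (qx qy qz rx ry rz : Int) : List (Int × Int × Int × Int) :=
  (List.range n).flatMap (fun i =>
    [(bitf qx (n - 1 - i), bitf rx (n - 1 - i), (1 : Int), ((i : Int) + 1)),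
     (bitf qy (n - 1 - i), bitf ry (n - 1 - i), (2 : Int), ((i : Int) + 1)),
     (bitf qz (n - 1 - i), bitf rz (n - 1 - i), (3 : Int), ((i : Int) + 1))])

theorem bitf_half (v : Int) (k : Nat) : bitf (PySem.Int.floordiv v 2) k = bitf v (k + 1) := by
  unfold bitf
  rw [PySem.Int.floordiv_eq_ediv_of_pos (b := 2) (by norm_num),
      PySem.Int.floordiv_eq_ediv_of_pos (by positivity),
      PySem.Int.floordiv_eq_ediv_of_pos (by positivity),
      Int.ediv_ediv_of_nonneg (by norm_num)]
  ring_nf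

theorem bitf_zero (v : Int) : bitf v 0 = PySem.Int.mod v 2 := by
  unfold bitf
  rw [pow_zero, PySem.Int.floordiv_eq_ediv_of_pos (by norm_num), Int.ediv_one]

theorem peel_eq_canon (n : Nat) : ∀ qx qy qz rx ry rz : Int,
    peel qx qy qz rx ry rz n = canon n qx qy qz rx ry rz := by
  induction n with
  | zero => intro qx qy qz rx ry rz; simp [peel, canon]
  | succ n ih =>
    intro qx qy qz rx ry rz
    rw [peel, ih]
    unfold canon
    rw [List.range_succ, List.flatMap_append]
    congr 1
    · refine List.flatMap_congr (fun i hi => ?_)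
      have hlt : i < n := List.mem_range.mp hi
      have h1 : n - 1 - i + 1 = n + 1 - 1 - i := by omega
      simp only [bitf_half, h1]
    · simp [bitf_zero]

theorem build_stream_eq_canon (q_point r_point : Int × Int × Int) :
    build_stream q_point r_point =
      canon BIT_WIDTH
        (PySem.Int.band q_point.1 ((2 ^ BIT_WIDTH : Int) - 1))
        (PySem.Int.band q_point.2.1 ((2 ^ BIT_WIDTH : Int) - 1))
        (PySem.Int.band q_point.2.2 ((2 ^ BIT_WIDTH : Int) - 1))
        (PySem.Int.band r_point.1 ((2 ^ BIT_WIDTH : Int) - 1))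
        (PySem.Int.band r_point.2.1 ((2 ^ BIT_WIDTH : Int) - 1))
        (PySem.Int.band r_point.2.2 ((2 ^ BIT_WIDTH : Int) - 1)) := by
  simp [build_stream, int_to_bits, canon, bitf, BIT_WIDTH, List.range_succ,
        PySem.Int.band_one]

-- ===== VERDICT (by name: the statement is the Claim_ definition above) =====
theorem build_stream_spec : Claim_equal_build_stream := by
  intro q r _
  show _ = _
  rw [build_stream_eq_canon, build_stream_alt, peel_eq_canon]
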